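-- pv_equiv track=rewrite | github.com/jimc101/opec-tools | src/main/python/MatchupEngine.py | find_ref_coordinate_names
-- ===== SOURCE A (Python) =====
-- def find_ref_coordinate_names(ref_coordinate_variables):
--     lat = None
--     lon = None
--     time = None
--     depth = None
--
--     for var in ref_coordinate_variables:
--         if 'lat' in var:
--             lat = var
--         if 'lon' in var:
--             lon = var
--         if 'time' in var:
--             time = var
--         if 'depth' in var:
--             depth = var
--
--     return lat, lon, time, depth
-- ===== SOURCE B (Python) =====
-- def find_ref_coordinate_names(ref_coordinate_variables):
--     def last_match(key):
--         return next((v for v in reversed(ref_coordinate_variables) if key in v), None)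
--     return (last_match('lat'), last_match('lon'),
--             last_match('time'), last_match('depth'))
-- ===== Notes on version B (the rewrite author's own statement) =====
-- stated objective: simpler
-- what changed: Replaces the single forward pass that keeps overwriting four accumulators with four independent first-match scans over the reversed sequence (last match per key), one per coordinate category.
import Mathlib
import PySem

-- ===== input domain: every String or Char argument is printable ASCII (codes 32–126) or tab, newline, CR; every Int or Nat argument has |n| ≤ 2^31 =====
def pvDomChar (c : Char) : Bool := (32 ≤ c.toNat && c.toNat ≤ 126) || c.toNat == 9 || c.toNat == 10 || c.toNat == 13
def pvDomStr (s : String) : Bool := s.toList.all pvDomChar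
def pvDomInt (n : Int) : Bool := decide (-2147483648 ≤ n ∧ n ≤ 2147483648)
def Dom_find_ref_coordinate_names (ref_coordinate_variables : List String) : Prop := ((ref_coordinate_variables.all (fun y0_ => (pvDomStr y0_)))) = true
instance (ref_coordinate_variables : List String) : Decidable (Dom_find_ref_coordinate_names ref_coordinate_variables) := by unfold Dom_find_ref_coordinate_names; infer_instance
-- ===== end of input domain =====

-- B replaces A's single forward pass with four overwritten accumulators by four
-- independent first-match scans over the reversed list (one per key): simpler decomposition.

-- ===== PORT A =====
-- one forward loop; each of the four accumulators is overwritten whenever its key occurs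
def find_ref_coordinate_names (ref_coordinate_variables : List String) : Option String × Option String × Option String × Option String :=
  ref_coordinate_variables.foldl
    (fun (st : Option String × Option String × Option String × Option String) var =>
      let lat   := if PySem.Str.isIn "lat" var   then some var else st.1
      let lon   := if PySem.Str.isIn "lon" var   then some var else st.2.1
      let time  := if PySem.Str.isIn "time" var  then some var else st.2.2.1
      let depth := if PySem.Str.isIn "depth" var then some var else st.2.2.2
      (lat, lon, time, depth))
    (none, none, none, none)

-- ===== PORT B =====
-- last_match(key) = first match in the reversed sequence, else None
def pvLastMatch (ref_coordinate_variables : List String) (key : String) : Option String :=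
  ref_coordinate_variables.reverse.find? (fun v => PySem.Str.isIn key v)

def find_ref_coordinate_names_alt (ref_coordinate_variables : List String) : Option String × Option String × Option String × Option String :=
  (pvLastMatch ref_coordinate_variables "lat", pvLastMatch ref_coordinate_variables "lon",
   pvLastMatch ref_coordinate_variables "time", pvLastMatch ref_coordinate_variables "depth")

-- ===== PRECONDITION & SPEC =====
def Spec_find_ref_coordinate_names (ref_coordinate_variables : List String) (out : Option String × Option String × Option String × Option String) : Prop := out = find_ref_coordinate_names_alt ref_coordinate_variables
instance (ref_coordinate_variables : List String) (out : Option String × Option String × Option String × Option String) : Decidable (Spec_find_ref_coordinate_names ref_coordinate_variables out) := by unfold Spec_find_ref_coordinate_names; infer_instance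

-- ===== CLAIM (what is proved, stated in full; the proofs are below) =====
def Claim_equal_find_ref_coordinate_names : Prop := ∀ (ref_coordinate_variables : List String), Dom_find_ref_coordinate_names ref_coordinate_variables → Spec_find_ref_coordinate_names ref_coordinate_variables (find_ref_coordinate_names ref_coordinate_variables)

-- ===== LEMMAS AND PROOFS =====

-- the four-accumulator fold equals, componentwise, "first match in the reverse, else the accumulator"
theorem pv_fold_eq (xs : List String) (lat lon time depth : Option String) :
    xs.foldl
      (fun (st : Option String × Option String × Option String × Option String) var =>
        let lat   := if PySem.Str.isIn "lat" var   then some var else st.1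
        let lon   := if PySem.Str.isIn "lon" var   then some var else st.2.1
        let time  := if PySem.Str.isIn "time" var  then some var else st.2.2.1
        let depth := if PySem.Str.isIn "depth" var then some var else st.2.2.2
        (lat, lon, time, depth))
      (lat, lon, time, depth)
    = ((pvLastMatch xs "lat").or lat, (pvLastMatch xs "lon").or lon,
       (pvLastMatch xs "time").or time, (pvLastMatch xs "depth").or depth) := by
  induction xs generalizing lat lon time depth with
  | nil => simp [pvLastMatch]
  | cons x xs ih =>
      simp only [List.foldl_cons, ih]
      have h : ∀ key a, (pvLastMatch (x :: xs) key).or a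
          = (pvLastMatch xs key).or (if PySem.Str.isIn key x then some x else a) := by
        intro key a
        simp only [pvLastMatch, List.reverse_cons, List.find?_append, Option.or_assoc]
        simp only [PySem.Str.isIn] at *
        rcases Bool.eq_false_or_eq_true (PySem.Chars.isIn key.toList x.toList) with hx | hx <;> simp [hx]
      rw [h, h, h, h]

theorem find_ref_coordinate_names_spec : Claim_equal_find_ref_coordinate_names := by
  intro xs _
  show find_ref_coordinate_names xs = find_ref_coordinate_names_alt xs
  unfold find_ref_coordinate_names find_ref_coordinate_names_alt
  rw [pv_fold_eq]
  simp
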